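-- pv_equiv track=rewrite | github.com/garuan2/Algorythms | skilled_fingers.py | skilled_fingers
-- ===== SOURCE A (Python) =====
-- import collections
--
-- def skilled_fingers(fingers, matrix):
--     k = 2 * fingers
--     input_data = list(map(int, matrix.replace(' ', '').replace('.', '')))
--     counted_data = collections.Counter(input_data)
--     result = 0
--     for value in counted_data.values():
--         if value <= k:
--             result += 1
--     return result
-- ===== SOURCE B (Python) =====
-- def skilled_fingers(fingers, matrix):
--     k = 2 * fingers
--     digits = sorted(map(int, matrix.replace(' ', '').replace('.', '')))
--     if not digits:
--         return 0
--     result = 0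
--     cur = digits[0]
--     run = 1
--     for y in digits[1:]:
--         if y == cur:
--             run += 1
--         else:
--             if run <= k:
--                 result += 1
--             cur, run = y, 1
--     if run <= k:
--         result += 1
--     return result
-- ===== Notes on version B (the rewrite author's own statement) =====
-- stated objective: alternative
-- what changed: Replaces the Counter hash table with sort-then-run-length scan: the digits are sorted and walked once, counting maximal runs of equal values whose length is at most 2*fingers.
import Mathlib
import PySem

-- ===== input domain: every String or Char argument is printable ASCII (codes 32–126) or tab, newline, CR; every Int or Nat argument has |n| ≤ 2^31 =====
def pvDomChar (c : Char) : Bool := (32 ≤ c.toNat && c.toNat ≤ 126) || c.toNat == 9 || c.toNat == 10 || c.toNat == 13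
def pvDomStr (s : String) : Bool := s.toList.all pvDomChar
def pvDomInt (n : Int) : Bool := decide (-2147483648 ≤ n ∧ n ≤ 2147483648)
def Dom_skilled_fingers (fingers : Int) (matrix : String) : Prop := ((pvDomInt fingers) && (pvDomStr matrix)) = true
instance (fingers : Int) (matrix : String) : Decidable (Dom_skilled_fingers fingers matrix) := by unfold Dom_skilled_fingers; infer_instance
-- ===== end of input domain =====

-- B replaces A's Counter hash table by sorting the digit list and counting maximal runs
-- of equal values in one scan (alternative algorithm, not claimed faster).

-- ===== PORT A =====
-- list(map(int, matrix.replace(' ', '').replace('.', ''))): int(c) per character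
-- (PySem.Int.ofStr? is exact; getD 0 is unreachable under Pre_, where every char is a digit)
def pvParse (matrix : String) : List Int :=
  ((PySem.Str.replace (PySem.Str.replace matrix " " "") "." "").toList).map
    (fun c => (PySem.Int.ofStr? (String.ofList [c])).getD 0)

def skilled_fingers (fingers : Int) (matrix : String) : Int :=
  let k := 2 * fingers
  let input_data := pvParse matrix
  let counted_data := PySem.Dict.counter input_data
  counted_data.values.foldl (fun result value => if value ≤ k then result + 1 else result) 0

-- ===== PORT B =====
-- the for-loop of Source B over digits[1:], carrying (cur, run, result)
def pvRunScan (k cur run result : Int) : List Int → Int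
  | [] => if run ≤ k then result + 1 else result
  | y :: t =>
      if y = cur then pvRunScan k cur (run + 1) result t
      else if run ≤ k then pvRunScan k y 1 (result + 1) t
      else pvRunScan k y 1 result t

-- 'if not digits: return 0' / start the scan at digits[0]
def pvScan (k : Int) : List Int → Int
  | [] => 0
  | x :: t => pvRunScan k x 1 0 t

def skilled_fingers_alt (fingers : Int) (matrix : String) : Int :=
  let k := 2 * fingers
  let digits := PySem.List.sorted (pvParse matrix) (fun x => x) false
  pvScan k digits

-- ===== PRECONDITION & SPEC =====
-- Pre_ excludes exactly the inputs on which A raises ValueError: a character of matrix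
-- that is neither a digit nor ' ' nor '.' makes int() fail.
def Pre_skilled_fingers (fingers : Int) (matrix : String) : Prop :=
  matrix.toList.all (fun c => c.isDigit || c == ' ' || c == '.') = true
instance (fingers : Int) (matrix : String) : Decidable (Pre_skilled_fingers fingers matrix) := by
  unfold Pre_skilled_fingers; infer_instance

def pvWitness_skilled_fingers : Int × String := (2, "123 321.14")

def Spec_skilled_fingers (fingers : Int) (matrix : String) (out : Int) : Prop := out = skilled_fingers_alt fingers matrix
instance (fingers : Int) (matrix : String) (out : Int) : Decidable (Spec_skilled_fingers fingers matrix out) := by unfold Spec_skilled_fingers; infer_instance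

-- ===== CLAIM (what is proved, stated in full; the proofs are below) =====
def Claim_equal_skilled_fingers : Prop := ∀ (fingers : Int) (matrix : String), Dom_skilled_fingers fingers matrix → Pre_skilled_fingers fingers matrix → Spec_skilled_fingers fingers matrix (skilled_fingers fingers matrix)

-- ===== LEMMAS AND PROOFS =====

-- the common value both sides compute: number of distinct digits whose multiplicity is ≤ k
def pvS (k : Int) (l : List Int) : Int :=
  ((PySem.List.dedup l).countP (fun v => decide ((l.count v : Int) ≤ k)) : Nat)

lemma pvFoldl_count (k : Int) (xs : List Int) (a : Int) :
    xs.foldl (fun r v => if v ≤ k then r + 1 else r) a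
      = a + (xs.countP (fun v => decide (v ≤ k)) : Nat) := by
  induction xs generalizing a with
  | nil => simp
  | cons x t ih =>
      simp only [List.foldl_cons, List.countP_cons, ih]
      by_cases h : x ≤ k <;> simp [h] <;> push_cast <;> ring

lemma pvValues_counter (L : List Int) :
    (PySem.Dict.counter L).values = (PySem.Set.ofList L).map (fun x => (L.count x : Int)) := by
  simp only [PySem.Dict.values, PySem.Dict.items_counter, List.map_map]
  simp [Function.comp]

lemma pvA_eq (fingers : Int) (matrix : String) :
    skilled_fingers fingers matrix = pvS (2 * fingers) (pvParse matrix) := by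
  simp only [skilled_fingers]
  rw [pvValues_counter, pvFoldl_count, List.countP_map, zero_add]
  simp only [pvS, PySem.List.dedup_eq_ofList, Function.comp_def]

lemma pvNodup_cons_dedup_filter (y : Int) (t : List Int) :
    (y :: PySem.List.dedup (t.filter (fun z => decide (z ≠ y)))).Nodup := by
  refine List.nodup_cons.2 ⟨?_, PySem.List.nodup_dedup _⟩
  intro h
  have hmem := (PySem.List.mem_dedup _ _).1 h
  simp at hmem

lemma pvS_cons (k y : Int) (t : List Int) :
    pvS k (y :: t)
      = (if (1 + (t.count y : Int)) ≤ k then 1 else 0)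
        + pvS k (t.filter (fun z => decide (z ≠ y))) := by
  unfold pvS
  have hperm : (PySem.List.dedup (y :: t)).Perm
      (y :: PySem.List.dedup (t.filter (fun z => decide (z ≠ y)))) := by
    refine (List.perm_ext_iff_of_nodup (PySem.List.nodup_dedup _)
      (pvNodup_cons_dedup_filter y t)).2 ?_
    intro a
    simp only [PySem.List.mem_dedup, List.mem_cons, List.mem_filter, decide_eq_true_eq]
    by_cases ha : a = y <;> simp [ha]
  rw [hperm.countP_eq]
  simp only [List.countP_cons]
  have hcy : ((y :: t).count y : Int) = 1 + (t.count y : Int) := by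
    rw [List.count_cons_self]; push_cast; ring
  have hrest : (PySem.List.dedup (t.filter (fun z => decide (z ≠ y)))).countP
        (fun v => decide (((y :: t).count v : Int) ≤ k))
      = (PySem.List.dedup (t.filter (fun z => decide (z ≠ y)))).countP
        (fun v => decide (((t.filter (fun z => decide (z ≠ y))).count v : Int) ≤ k)) := by
    refine List.countP_congr ?_
    intro a ha
    have hay : a ≠ y := by
      have hmem := (PySem.List.mem_dedup _ _).1 ha
      simp at hmem; exact hmem.2
    have h1 : (y :: t).count a = t.count a := by simp [Ne.symm hay]
    have h2 : (t.filter (fun z => decide (z ≠ y))).count a = t.count a := by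
      rw [List.count_filter]; simp [hay]
    rw [h1, ← h2]
  rw [hrest, hcy]
  by_cases h : 1 + (t.count y : Int) ≤ k <;> simp [h] <;> push_cast <;> ring

lemma pvRunScan_spec (k : Int) (t : List Int) : ∀ (v run res : Int),
    t.Pairwise (· ≤ ·) → (∀ y ∈ t, v ≤ y) →
    pvRunScan k v run res t
      = res + (if run + (t.count v : Int) ≤ k then 1 else 0)
          + pvS k (t.filter (fun z => decide (z ≠ v))) := by
  induction t with
  | nil =>
      intro v run res _ _
      simp only [pvRunScan, List.count_nil, List.filter_nil]
      have h0 : pvS k [] = 0 := by simp [pvS, PySem.List.dedup]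
      rw [h0]
      by_cases h : run ≤ k <;> simp [h]
  | cons y t ih =>
      intro v run res hp hv
      have hyt : ∀ z ∈ t, y ≤ z := List.pairwise_cons.1 hp |>.1
      have hpt : t.Pairwise (· ≤ ·) := List.pairwise_cons.1 hp |>.2
      by_cases hy : y = v
      · subst hy
        have step : pvRunScan k y run res (y :: t) = pvRunScan k y (run + 1) res t := by
          simp [pvRunScan]
        rw [step, ih y (run + 1) res hpt hyt]
        have hc : ((y :: t).count y : Int) = (t.count y : Int) + 1 := by
          rw [List.count_cons_self]; push_cast; ring
        have hf : (y :: t).filter (fun z => decide (z ≠ y))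
            = t.filter (fun z => decide (z ≠ y)) := by simp
        rw [hc, hf]
        have : run + 1 + (t.count y : Int) = run + ((t.count y : Int) + 1) := by ring
        rw [this]
      · have hvy : v ≤ y := hv y (List.mem_cons_self ..)
        have hvt : ∀ z ∈ t, v ≤ z := fun z hz => le_trans hvy (hyt z hz)
        have hvnott : v ∉ t := by
          intro hvmem
          have := hyt v hvmem
          exact hy (le_antisymm this hvy)
        have hcv : ((y :: t).count v : Int) = 0 := by
          simp [hy, List.count_eq_zero_of_not_mem hvnott]
        have hfv : (y :: t).filter (fun z => decide (z ≠ v)) = y :: t := by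
          refine List.filter_eq_self.2 ?_
          intro z hz
          simp only [List.mem_cons] at hz
          rcases hz with rfl | hz
          · simpa using hy
          · simp only [decide_eq_true_eq]
            intro hzv; subst hzv; exact hvnott hz
        rw [hcv, hfv, add_zero, pvS_cons k y t]
        simp only [pvRunScan, if_neg hy]
        by_cases hr : run ≤ k
        · rw [if_pos hr, ih y 1 (res + 1) hpt hyt, if_pos hr]
          ring
        · rw [if_neg hr, ih y 1 res hpt hyt, if_neg hr]
          ring

lemma pvS_perm (k : Int) (s l : List Int) (hperm : s.Perm l) :
    pvS k s = pvS k l := by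
  unfold pvS
  have hmem : ∀ a, a ∈ PySem.List.dedup s ↔ a ∈ PySem.List.dedup l := by
    intro a
    rw [PySem.List.mem_dedup, PySem.List.mem_dedup]
    exact hperm.mem_iff
  have hdperm : (PySem.List.dedup s).Perm (PySem.List.dedup l) :=
    (List.perm_ext_iff_of_nodup (PySem.List.nodup_dedup _) (PySem.List.nodup_dedup _)).2 hmem
  have hcnt : ∀ a ∈ PySem.List.dedup s,
      decide ((s.count a : Int) ≤ k) = true ↔ decide ((l.count a : Int) ≤ k) = true := by
    intro a _
    rw [hperm.count_eq]
  rw [List.countP_congr hcnt, hdperm.countP_eq]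

lemma pvScan_sorted (k : Int) (s : List Int) (hpw : s.Pairwise (· ≤ ·)) :
    pvScan k s = pvS k s := by
  cases s with
  | nil => simp [pvScan, pvS, PySem.List.dedup]
  | cons x t =>
      have hxt : ∀ z ∈ t, x ≤ z := (List.pairwise_cons.1 hpw).1
      have hpt : t.Pairwise (· ≤ ·) := (List.pairwise_cons.1 hpw).2
      have hstep : pvScan k (x :: t) = pvRunScan k x 1 0 t := by simp [pvScan]
      rw [hstep, pvRunScan_spec k t x 1 0 hpt hxt, pvS_cons]
      ring

lemma pvB_eq (fingers : Int) (matrix : String) :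
    skilled_fingers_alt fingers matrix = pvS (2 * fingers) (pvParse matrix) := by
  simp only [skilled_fingers_alt]
  rw [pvScan_sorted (2 * fingers) (PySem.List.sorted (pvParse matrix) (fun x => x) false)
        (by simpa using PySem.List.sorted_pairwise (xs := pvParse matrix) (key := fun x => x))]
  exact pvS_perm (2 * fingers) _ _ (PySem.List.sorted_perm ..)

-- ===== VERDICT (by name: the statement is the Claim_ definition above) =====
theorem skilled_fingers_spec : Claim_equal_skilled_fingers := by
  intro fingers matrix _ _
  unfold Spec_skilled_fingers
  rw [pvA_eq, pvB_eq]
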